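-- pv_equiv track=rewrite | github.com/lrobinot/dotfiles | plugins/filter/list.py | list_insert_before
-- ===== SOURCE A (Python) =====
-- def list_insert_before(inStr, value, before):
--     l = inStr.strip('][').split(', ')
--     length = len(l)
--     for i in range(length):
--         if l[i] == "'" + value + "'":
--             del l[i]
--             break
--     length = len(l)
--     for i in range(length):
--         if l[i] == "'" + before + "'":
--             l.insert(i, "'" + value + "'")
--             break
--     return "[" + ", ".join(l) + "]"
-- ===== SOURCE B (Python) =====
-- def list_insert_before(inStr, value, before):
--     qv = "'" + value + "'"
--     qb = "'" + before + "'"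
--     out = []
--     deleted = False
--     inserted = False
--     for tok in inStr.strip('][').split(', '):
--         if tok == qv and not deleted:
--             deleted = True
--         elif tok == qb and not inserted:
--             inserted = True
--             out.append(qv)
--             out.append(tok)
--         else:
--             out.append(tok)
--     return '[' + ', '.join(out) + ']'
-- ===== Notes on version B (the rewrite author's own statement) =====
-- stated objective: simpler
-- what changed: Replaces A's two separate scans with in-place del/insert by a single pass over the tokens that builds the output list with two booleans (deleted/inserted).
import Mathlib
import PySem

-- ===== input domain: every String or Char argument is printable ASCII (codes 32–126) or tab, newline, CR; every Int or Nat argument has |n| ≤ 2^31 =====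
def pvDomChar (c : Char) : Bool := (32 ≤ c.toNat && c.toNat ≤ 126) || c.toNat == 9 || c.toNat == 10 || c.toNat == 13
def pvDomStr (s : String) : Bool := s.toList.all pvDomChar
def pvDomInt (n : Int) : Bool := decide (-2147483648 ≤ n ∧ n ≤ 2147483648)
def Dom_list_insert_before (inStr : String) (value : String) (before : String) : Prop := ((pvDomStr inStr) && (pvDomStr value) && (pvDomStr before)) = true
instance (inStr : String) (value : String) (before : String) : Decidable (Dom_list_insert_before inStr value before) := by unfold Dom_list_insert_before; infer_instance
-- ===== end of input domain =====

-- B replaces A's two scans with in-place del/insert by one pass building the output with two booleans; same cost, simpler shape.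

-- ===== PORT A =====
-- first loop of A: scan, delete the first element equal to q, break
def pvDelFirst (q : String) : List String → List String
  | [] => []
  | t :: ts => if t == q then ts else t :: pvDelFirst q ts

-- second loop of A: scan, insert v before the first element equal to q, break
def pvInsFirst (q : String) (v : String) : List String → List String
  | [] => []
  | t :: ts => if t == q then v :: t :: ts else t :: pvInsFirst q v ts

def list_insert_before (inStr : String) (value : String) (before : String) : String :=
  let l := (PySem.Str.split? (PySem.Str.stripChars inStr "][") ", ").getD []
  let l := pvDelFirst ("'" ++ value ++ "'") l
  let l := pvInsFirst ("'" ++ before ++ "'") ("'" ++ value ++ "'") l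
  "[" ++ PySem.Str.join ", " l ++ "]"

-- ===== PORT B =====
-- B's single for-loop with the two flags, building `out`
def pvOnePass (qv qb : String) : List String → Bool → Bool → List String
  | [], _, _ => []
  | t :: ts, deleted, inserted =>
    if t == qv && !deleted then pvOnePass qv qb ts true inserted
    else if t == qb && !inserted then qv :: t :: pvOnePass qv qb ts deleted true
    else t :: pvOnePass qv qb ts deleted inserted

def list_insert_before_alt (inStr : String) (value : String) (before : String) : String :=
  let qv := "'" ++ value ++ "'"
  let qb := "'" ++ before ++ "'"
  let out := pvOnePass qv qb ((PySem.Str.split? (PySem.Str.stripChars inStr "][") ", ").getD []) false false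
  "[" ++ PySem.Str.join ", " out ++ "]"

-- ===== PRECONDITION & SPEC =====
def Spec_list_insert_before (inStr : String) (value : String) (before : String) (out : String) : Prop := out = list_insert_before_alt inStr value before
instance (inStr : String) (value : String) (before : String) (out : String) : Decidable (Spec_list_insert_before inStr value before out) := by unfold Spec_list_insert_before; infer_instance

-- ===== CLAIM (what is proved, stated in full; the proofs are below) =====
def Claim_equal_list_insert_before : Prop := ∀ (inStr : String) (value : String) (before : String), Dom_list_insert_before inStr value before → Spec_list_insert_before inStr value before (list_insert_before inStr value before)

-- ===== LEMMAS AND PROOFS =====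

-- once both flags are set, B's pass is the identity
theorem onePass_tt (qv qb : String) (l : List String) : pvOnePass qv qb l true true = l := by
  induction l with
  | nil => rfl
  | cons t ts ih => simp [pvOnePass, ih]

-- with deleted set and inserted clear, B's pass is A's second loop
theorem onePass_ins (qv qb : String) (l : List String) :
    pvOnePass qv qb l true false = pvInsFirst qb qv l := by
  induction l with
  | nil => rfl
  | cons t ts ih =>
    by_cases h : t = qb <;> simp [pvOnePass, pvInsFirst, h, ih, onePass_tt]

-- with inserted set and deleted clear, B's pass is A's first loop
theorem onePass_del (qv qb : String) (l : List String) :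
    pvOnePass qv qb l false true = pvDelFirst qv l := by
  induction l with
  | nil => rfl
  | cons t ts ih =>
    by_cases h : t = qv <;> simp [pvOnePass, pvDelFirst, h, ih, onePass_tt]

-- the main invariant: one pass = delete-first then insert-first
theorem onePass_main (qv qb : String) (l : List String) :
    pvOnePass qv qb l false false = pvInsFirst qb qv (pvDelFirst qv l) := by
  induction l with
  | nil => rfl
  | cons t ts ih =>
    by_cases hv : t = qv
    · simp [pvOnePass, pvDelFirst, hv, onePass_ins]
    · by_cases hb : t = qb
      · subst hb; simp [pvOnePass, pvDelFirst, pvInsFirst, hv, onePass_del]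
      · simp [pvOnePass, pvDelFirst, pvInsFirst, hv, hb, ih]

-- ===== VERDICT (by name: the statement is the Claim_ definition above) =====
theorem list_insert_before_spec : Claim_equal_list_insert_before := by
  intro inStr value before _
  unfold Spec_list_insert_before list_insert_before list_insert_before_alt
  simp [onePass_main]
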